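-- pv_equiv track=rewrite | github.com/sumitsk/algp | graph_utils.py | get_down_and_up_nodes
-- ===== SOURCE A (Python) =====
-- def get_down_and_up_nodes(node, others, down_junction, up_junction):
--     # find nodes just above and below the current node
--     down_node, up_node = down_junction, up_junction
--     for nd in others:
--         if nd == node:
--             continue
--         if in_between(nd, down_node, node):
--             down_node = nd
--         if in_between(nd, node, up_node):
--             up_node = nd
--     return down_node, up_node
--
-- def in_between(node, down_node, up_node):
--     # check if node lies between down and up
--     if node[1] == down_node[1] and node[1] == up_node[1]:
--         if down_node[0] > node[0] > up_node[0]: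
--             return True
--     return False
-- ===== SOURCE B (Python) =====
-- def _bisect_gt(rows, x, lo, hi):
--     # binary search: first index i in [lo, hi) with rows[i] > x (hi if none)
--     if lo >= hi:
--         return lo
--     mid = (lo + hi) // 2
--     if rows[mid] <= x:
--         return _bisect_gt(rows, x, mid + 1, hi)
--     return _bisect_gt(rows, x, lo, mid)
--
--
-- def _bisect_ge(rows, x, lo, hi):
--     # binary search: first index i in [lo, hi) with rows[i] >= x (hi if none)
--     if lo >= hi:
--         return lo
--     mid = (lo + hi) // 2
--     if rows[mid] < x:
--         return _bisect_ge(rows, x, mid + 1, hi)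
--     return _bisect_ge(rows, x, lo, mid)
--
--
-- def get_down_and_up_nodes(node, others, down_junction, up_junction):
--     # sort the same-column rows once, then binary-search node's row: the entry
--     # just above it is rows[i] (first row > node[0]) and the one just below is
--     # rows[j-1] (last row < node[0]); each is taken only if it beats the gated junction.
--     rows = sorted(nd[0] for nd in others if nd[1] == node[1])
--     n = len(rows)
--     down, up = down_junction, up_junction
--     if down_junction[1] == node[1]:
--         i = _bisect_gt(rows, node[0], 0, n)
--         if i < n and rows[i] < down_junction[0]:
--             down = (rows[i], node[1])
--     if up_junction[1] == node[1]:
--         j = _bisect_ge(rows, node[0], 0, n)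
--         if j > 0 and rows[j - 1] > up_junction[0]:
--             up = (rows[j - 1], node[1])
--     return down, up
-- ===== Notes on version B (the rewrite author's own statement) =====
-- stated objective: alternative
-- what changed: A's single pass with two running down/up accumulators is replaced by sorting the same-column rows once and binary-searching node's row, so each neighbour is read off as the adjacent sorted entry (gated by the junction column and bounds).
import Mathlib
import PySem

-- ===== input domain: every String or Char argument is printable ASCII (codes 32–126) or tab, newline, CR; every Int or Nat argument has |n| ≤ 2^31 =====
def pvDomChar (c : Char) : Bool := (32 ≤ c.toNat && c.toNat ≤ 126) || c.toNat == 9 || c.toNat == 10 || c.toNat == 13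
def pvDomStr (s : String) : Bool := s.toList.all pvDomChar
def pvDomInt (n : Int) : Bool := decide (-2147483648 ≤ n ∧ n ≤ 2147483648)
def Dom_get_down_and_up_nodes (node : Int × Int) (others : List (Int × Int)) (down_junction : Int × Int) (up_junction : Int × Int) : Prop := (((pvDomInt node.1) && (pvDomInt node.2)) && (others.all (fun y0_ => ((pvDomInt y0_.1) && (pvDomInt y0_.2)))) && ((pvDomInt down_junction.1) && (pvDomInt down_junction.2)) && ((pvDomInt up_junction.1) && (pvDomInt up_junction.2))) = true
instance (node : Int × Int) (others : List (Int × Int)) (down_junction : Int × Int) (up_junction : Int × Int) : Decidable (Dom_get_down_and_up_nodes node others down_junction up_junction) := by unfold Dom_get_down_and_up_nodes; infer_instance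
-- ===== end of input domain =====

-- B replaces A's single accumulator scan by sorting the same-column rows once and
-- binary-searching node's row for its immediate neighbours (objective: alternative).

-- ===== PORT A =====
def pv_in_between (node down_node up_node : Int × Int) : Bool :=
  if node.2 = down_node.2 ∧ node.2 = up_node.2 then
    if down_node.1 > node.1 ∧ node.1 > up_node.1 then true else false
  else false

def get_down_and_up_nodes (node : Int × Int) (others : List (Int × Int)) (down_junction : Int × Int) (up_junction : Int × Int) : (Int × Int) × (Int × Int) :=
  others.foldl (fun s nd =>
    if nd = node then s
    else
      ((if pv_in_between nd s.1 node then nd else s.1),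
       (if pv_in_between nd node s.2 then nd else s.2)))
    (down_junction, up_junction)

-- ===== PORT B =====
-- _bisect_gt(rows, x, lo, hi): first index i in [lo, hi) with rows[i] > x (hi if none).
-- rows[mid] is ported as getD mid 0 — exact: the index is always in range here.
def pvBisectGt (rows : List Int) (x : Int) (lo hi : Nat) : Nat :=
  if lo ≥ hi then lo
  else
    let mid := (lo + hi) / 2
    if rows.getD mid 0 ≤ x then pvBisectGt rows x (mid + 1) hi
    else pvBisectGt rows x lo mid
termination_by hi - lo

-- _bisect_ge(rows, x, lo, hi): first index i in [lo, hi) with rows[i] >= x (hi if none)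
def pvBisectGe (rows : List Int) (x : Int) (lo hi : Nat) : Nat :=
  if lo ≥ hi then lo
  else
    let mid := (lo + hi) / 2
    if rows.getD mid 0 < x then pvBisectGe rows x (mid + 1) hi
    else pvBisectGe rows x lo mid
termination_by hi - lo

def get_down_and_up_nodes_alt (node : Int × Int) (others : List (Int × Int)) (down_junction : Int × Int) (up_junction : Int × Int) : (Int × Int) × (Int × Int) :=
  -- rows = sorted(nd[0] for nd in others if nd[1] == node[1])
  let rows := PySem.List.sorted ((others.filter (fun nd => nd.2 = node.2)).map Prod.fst) (fun r => r) false
  let n := rows.length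
  let down :=
    if down_junction.2 = node.2 then
      let i := pvBisectGt rows node.1 0 n
      if i < n ∧ rows.getD i 0 < down_junction.1 then (rows.getD i 0, node.2)
      else down_junction
    else down_junction
  let up :=
    if up_junction.2 = node.2 then
      let j := pvBisectGe rows node.1 0 n
      if 0 < j ∧ rows.getD (j - 1) 0 > up_junction.1 then (rows.getD (j - 1) 0, node.2)
      else up_junction
    else up_junction
  (down, up)

-- ===== PRECONDITION & SPEC =====
def Spec_get_down_and_up_nodes (node : Int × Int) (others : List (Int × Int)) (down_junction : Int × Int) (up_junction : Int × Int) (out : (Int × Int) × (Int × Int)) : Prop := out = get_down_and_up_nodes_alt node others down_junction up_junction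
instance (node : Int × Int) (others : List (Int × Int)) (down_junction : Int × Int) (up_junction : Int × Int) (out : (Int × Int) × (Int × Int)) : Decidable (Spec_get_down_and_up_nodes node others down_junction up_junction out) := by unfold Spec_get_down_and_up_nodes; infer_instance

-- ===== CLAIM (what is proved, stated in full; the proofs are below) =====
def Claim_equal_get_down_and_up_nodes : Prop := ∀ (node : Int × Int) (others : List (Int × Int)) (down_junction : Int × Int) (up_junction : Int × Int), Dom_get_down_and_up_nodes node others down_junction up_junction → Spec_get_down_and_up_nodes node others down_junction up_junction (get_down_and_up_nodes node others down_junction up_junction)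

-- ===== LEMMAS AND PROOFS =====

theorem pv_in_between_iff (a b c : Int × Int) :
    pv_in_between a b c = true ↔ (a.2 = b.2 ∧ a.2 = c.2 ∧ b.1 > a.1 ∧ a.1 > c.1) := by
  unfold pv_in_between
  split_ifs with h1 h2 <;> simp_all
  omega

-- A's down-component step and up-component step in isolation
def pvStepD (node : Int × Int) (d nd : Int × Int) : Int × Int :=
  if nd = node then d else if pv_in_between nd d node then nd else d
def pvStepU (node : Int × Int) (u nd : Int × Int) : Int × Int :=
  if nd = node then u else if pv_in_between nd node u then nd else u

theorem pv_split (node : Int × Int) (others : List (Int × Int)) (d u : Int × Int) :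
    (others.foldl (fun s nd =>
      if nd = node then s
      else
        ((if pv_in_between nd s.1 node then nd else s.1),
         (if pv_in_between nd node s.2 then nd else s.2))) (d, u))
    = (others.foldl (pvStepD node) d, others.foldl (pvStepU node) u) := by
  induction others generalizing d u with
  | nil => rfl
  | cons nd rest ih =>
      simp only [List.foldl, pvStepD, pvStepU]
      split_ifs <;> exact ih _ _

theorem pv_nocolD (node : Int × Int) (others : List (Int × Int)) (d : Int × Int)
    (h : d.2 ≠ node.2) : others.foldl (pvStepD node) d = d := by
  induction others generalizing d with
  | nil => rfl
  | cons nd rest ih =>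
      have hstep : pvStepD node d nd = d := by
        unfold pvStepD
        split_ifs with hn hib
        · rfl
        · have := (pv_in_between_iff nd d node).mp hib
          exact absurd (this.1.symm.trans this.2.1) h
        · rfl
      rw [List.foldl, hstep]; exact ih _ h

theorem pv_nocolU (node : Int × Int) (others : List (Int × Int)) (u : Int × Int)
    (h : u.2 ≠ node.2) : others.foldl (pvStepU node) u = u := by
  induction others generalizing u with
  | nil => rfl
  | cons nd rest ih =>
      have hstep : pvStepU node u nd = u := by
        unfold pvStepU
        split_ifs with hn hib
        · rfl
        · have := (pv_in_between_iff nd node u).mp hib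
          exact absurd (this.2.1.symm.trans this.1) h
        · rfl
      rw [List.foldl, hstep]; exact ih _ h

-- running first-extremal min/max over pairs, keyed by the first coordinate
def pvMinFrom (t : List (Int × Int)) (m : Int × Int) : Int × Int :=
  t.foldl (fun m nd => if nd.1 < m.1 then nd else m) m
def pvMaxFrom (t : List (Int × Int)) (m : Int × Int) : Int × Int :=
  t.foldl (fun m nd => if nd.1 > m.1 then nd else m) m

-- the candidate bound may be tightened to the accumulator's key without changing pvMinFrom
theorem pvMin_bound (L : List (Int × Int)) (q : Int × Int → Bool) :
    ∀ (m : Int × Int) (b1 b2 : Int), m.1 ≤ b1 → m.1 ≤ b2 →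
      pvMinFrom (L.filter (fun x => q x && decide (x.1 < b1))) m
      = pvMinFrom (L.filter (fun x => q x && decide (x.1 < b2))) m := by
  induction L with
  | nil => intros; rfl
  | cons x L ih =>
      intro m b1 b2 h1 h2
      by_cases hq : q x = true
      · by_cases hxm : x.1 < m.1
        · rw [List.filter_cons, List.filter_cons,
              if_pos (by simp [hq]; omega), if_pos (by simp [hq]; omega)]
          show pvMinFrom _ (if x.1 < m.1 then x else m) = pvMinFrom _ (if x.1 < m.1 then x else m)
          rw [if_pos hxm]
          exact ih x b1 b2 (by omega) (by omega)
        · by_cases k1 : x.1 < b1 <;> by_cases k2 : x.1 < b2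
          · rw [List.filter_cons, List.filter_cons,
                if_pos (by simp [hq, k1]), if_pos (by simp [hq, k2])]
            show pvMinFrom _ (if x.1 < m.1 then x else m) = pvMinFrom _ (if x.1 < m.1 then x else m)
            rw [if_neg hxm]
            exact ih m b1 b2 h1 h2
          · rw [List.filter_cons, List.filter_cons,
                if_pos (by simp [hq, k1]), if_neg (by simp [hq, k2])]
            show pvMinFrom _ (if x.1 < m.1 then x else m) = _
            rw [if_neg hxm]
            exact ih m b1 b2 h1 h2
          · rw [List.filter_cons, List.filter_cons,
                if_neg (by simp [hq, k1]), if_pos (by simp [hq, k2])]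
            show _ = pvMinFrom _ (if x.1 < m.1 then x else m)
            rw [if_neg hxm]
            exact ih m b1 b2 h1 h2
          · rw [List.filter_cons, List.filter_cons,
                if_neg (by simp [hq, k1]), if_neg (by simp [hq, k2])]
            exact ih m b1 b2 h1 h2
      · rw [List.filter_cons, List.filter_cons, if_neg (by simp [hq]), if_neg (by simp [hq])]
        exact ih m b1 b2 h1 h2

theorem pvMax_bound (L : List (Int × Int)) (q : Int × Int → Bool) :
    ∀ (m : Int × Int) (b1 b2 : Int), b1 ≤ m.1 → b2 ≤ m.1 →
      pvMaxFrom (L.filter (fun x => q x && decide (b1 < x.1))) m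
      = pvMaxFrom (L.filter (fun x => q x && decide (b2 < x.1))) m := by
  induction L with
  | nil => intros; rfl
  | cons x L ih =>
      intro m b1 b2 h1 h2
      by_cases hq : q x = true
      · by_cases hxm : x.1 > m.1
        · rw [List.filter_cons, List.filter_cons,
              if_pos (by simp [hq]; omega), if_pos (by simp [hq]; omega)]
          show pvMaxFrom _ (if x.1 > m.1 then x else m) = pvMaxFrom _ (if x.1 > m.1 then x else m)
          rw [if_pos hxm]
          exact ih x b1 b2 (by omega) (by omega)
        · by_cases k1 : b1 < x.1 <;> by_cases k2 : b2 < x.1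
          · rw [List.filter_cons, List.filter_cons,
                if_pos (by simp [hq, k1]), if_pos (by simp [hq, k2])]
            show pvMaxFrom _ (if x.1 > m.1 then x else m) = pvMaxFrom _ (if x.1 > m.1 then x else m)
            rw [if_neg hxm]
            exact ih m b1 b2 h1 h2
          · rw [List.filter_cons, List.filter_cons,
                if_pos (by simp [hq, k1]), if_neg (by simp [hq, k2])]
            show pvMaxFrom _ (if x.1 > m.1 then x else m) = _
            rw [if_neg hxm]
            exact ih m b1 b2 h1 h2
          · rw [List.filter_cons, List.filter_cons,
                if_neg (by simp [hq, k1]), if_pos (by simp [hq, k2])]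
            show _ = pvMaxFrom _ (if x.1 > m.1 then x else m)
            rw [if_neg hxm]
            exact ih m b1 b2 h1 h2
          · rw [List.filter_cons, List.filter_cons,
                if_neg (by simp [hq, k1]), if_neg (by simp [hq, k2])]
            exact ih m b1 b2 h1 h2
      · rw [List.filter_cons, List.filter_cons, if_neg (by simp [hq]), if_neg (by simp [hq])]
        exact ih m b1 b2 h1 h2

def pvQD (node nd : Int × Int) : Bool := decide (nd ≠ node ∧ nd.2 = node.2 ∧ node.1 < nd.1)
def pvQU (node nd : Int × Int) : Bool := decide (nd ≠ node ∧ nd.2 = node.2 ∧ nd.1 < node.1)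
def pvPredD (node : Int × Int) (b : Int) (nd : Int × Int) : Bool := pvQD node nd && decide (nd.1 < b)
def pvPredU (node : Int × Int) (b : Int) (nd : Int × Int) : Bool := pvQU node nd && decide (b < nd.1)

theorem pv_mainD_pair (node : Int × Int) (others : List (Int × Int)) (d : Int × Int)
    (hd : d.2 = node.2) :
    others.foldl (pvStepD node) d = pvMinFrom (others.filter (pvPredD node d.1)) d := by
  induction others generalizing d with
  | nil => rfl
  | cons nd rest ih =>
      by_cases hn : nd = node
      · have hp : pvPredD node d.1 nd = false := by simp [pvPredD, pvQD, hn]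
        rw [List.foldl, show pvStepD node d nd = d from by simp [pvStepD, hn],
            List.filter_cons, if_neg (by simp [hp])]
        exact ih d hd
      · by_cases hib : pv_in_between nd d node = true
        · have hib' := (pv_in_between_iff nd d node).mp hib
          have hp : pvPredD node d.1 nd = true := by
            simp only [pvPredD, pvQD, Bool.and_eq_true, decide_eq_true_eq]
            exact ⟨⟨hn, hib'.2.1, hib'.2.2.2⟩, hib'.2.2.1⟩
          rw [List.foldl, show pvStepD node d nd = nd from by simp [pvStepD, hn, hib],
              List.filter_cons, if_pos hp, ih nd hib'.2.1]
          have hnd : pvMinFrom (nd :: rest.filter (pvPredD node d.1)) d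
              = pvMinFrom (rest.filter (pvPredD node d.1)) nd := by
            show pvMinFrom (rest.filter (pvPredD node d.1)) (if nd.1 < d.1 then nd else d)
                = pvMinFrom (rest.filter (pvPredD node d.1)) nd
            rw [if_pos hib'.2.2.1]
          rw [hnd]
          exact pvMin_bound rest (pvQD node) nd nd.1 d.1 le_rfl (le_of_lt hib'.2.2.1)
        · have hp : pvPredD node d.1 nd = false := by
            refine Bool.eq_false_iff.mpr ?_
            intro hc
            simp only [pvPredD, pvQD, Bool.and_eq_true, decide_eq_true_eq] at hc
            obtain ⟨⟨hy1, hy2, hy3⟩, hy4⟩ := hc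
            exact hib ((pv_in_between_iff nd d node).mpr ⟨hy2.trans hd.symm, hy2, hy4, hy3⟩)
          rw [List.foldl, show pvStepD node d nd = d from by simp [pvStepD, hn, hib],
              List.filter_cons, if_neg (by simp [hp])]
          exact ih d hd

theorem pv_mainU_pair (node : Int × Int) (others : List (Int × Int)) (u : Int × Int)
    (hu : u.2 = node.2) :
    others.foldl (pvStepU node) u = pvMaxFrom (others.filter (pvPredU node u.1)) u := by
  induction others generalizing u with
  | nil => rfl
  | cons nd rest ih =>
      by_cases hn : nd = node
      · have hp : pvPredU node u.1 nd = false := by simp [pvPredU, pvQU, hn]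
        rw [List.foldl, show pvStepU node u nd = u from by simp [pvStepU, hn],
            List.filter_cons, if_neg (by simp [hp])]
        exact ih u hu
      · by_cases hib : pv_in_between nd node u = true
        · have hib' := (pv_in_between_iff nd node u).mp hib
          have hp : pvPredU node u.1 nd = true := by
            simp only [pvPredU, pvQU, Bool.and_eq_true, decide_eq_true_eq]
            exact ⟨⟨hn, hib'.1, hib'.2.2.1⟩, hib'.2.2.2⟩
          rw [List.foldl, show pvStepU node u nd = nd from by simp [pvStepU, hn, hib],
              List.filter_cons, if_pos hp, ih nd hib'.1]
          have hnd : pvMaxFrom (nd :: rest.filter (pvPredU node u.1)) u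
              = pvMaxFrom (rest.filter (pvPredU node u.1)) nd := by
            show pvMaxFrom (rest.filter (pvPredU node u.1)) (if nd.1 > u.1 then nd else u)
                = pvMaxFrom (rest.filter (pvPredU node u.1)) nd
            rw [if_pos hib'.2.2.2]
          rw [hnd]
          exact pvMax_bound rest (pvQU node) nd nd.1 u.1 le_rfl (le_of_lt hib'.2.2.2)
        · have hp : pvPredU node u.1 nd = false := by
            refine Bool.eq_false_iff.mpr ?_
            intro hc
            simp only [pvPredU, pvQU, Bool.and_eq_true, decide_eq_true_eq] at hc
            obtain ⟨⟨hy1, hy2, hy3⟩, hy4⟩ := hc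
            exact hib ((pv_in_between_iff nd node u).mpr ⟨hy2, hy2.trans hu.symm, hy3, hy4⟩)
          rw [List.foldl, show pvStepU node u nd = u from by simp [pvStepU, hn, hib],
              List.filter_cons, if_neg (by simp [hp])]
          exact ih u hu

-- in a constant column the pair-valued extremum is the row-valued extremum paired with the column
theorem pvMinFrom_snd_const (Lp : List (Int × Int)) (c : Int) :
    ∀ d : Int × Int, d.2 = c → (∀ p ∈ Lp, p.2 = c) →
    pvMinFrom Lp d = ((Lp.map Prod.fst).foldl (fun m r => if r < m then r else m) d.1, c) := by
  induction Lp with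
  | nil => intro d hd _; exact Prod.ext rfl hd
  | cons p t ih =>
      intro d hd hall
      show pvMinFrom t (if p.1 < d.1 then p else d) = _
      simp only [List.map, List.foldl]
      by_cases h : p.1 < d.1
      · rw [if_pos h, ih p (hall p (by simp)) (fun q hq => hall q (by simp [hq]))]
        simp [h]
      · rw [if_neg h, if_neg h, ih d hd (fun q hq => hall q (by simp [hq]))]

theorem pvMaxFrom_snd_const (Lp : List (Int × Int)) (c : Int) :
    ∀ d : Int × Int, d.2 = c → (∀ p ∈ Lp, p.2 = c) →
    pvMaxFrom Lp d = ((Lp.map Prod.fst).foldl (fun m r => if r > m then r else m) d.1, c) := by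
  induction Lp with
  | nil => intro d hd _; exact Prod.ext rfl hd
  | cons p t ih =>
      intro d hd hall
      show pvMaxFrom t (if p.1 > d.1 then p else d) = _
      simp only [List.map, List.foldl]
      by_cases h : p.1 > d.1
      · rw [if_pos h, ih p (hall p (by simp)) (fun q hq => hall q (by simp [hq]))]
        simp [h]
      · rw [if_neg h, if_neg h, ih d hd (fun q hq => hall q (by simp [hq]))]

-- A's fold with the column gate open, stated over the same-column row list
theorem pv_mainD (node : Int × Int) (others : List (Int × Int)) (d : Int × Int)
    (hd : d.2 = node.2) :
    others.foldl (pvStepD node) d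
      = ((((others.filter (fun nd => nd.2 = node.2)).map Prod.fst).filter
            (fun r => decide (node.1 < r) && decide (r < d.1))).foldl
          (fun m r => if r < m then r else m) d.1, node.2) := by
  rw [pv_mainD_pair node others d hd]
  rw [pvMinFrom_snd_const (others.filter (pvPredD node d.1)) node.2 d hd
        (by
          intro p hp
          have := List.of_mem_filter hp
          simp only [pvPredD, pvQD, Bool.and_eq_true, decide_eq_true_eq] at this
          exact this.1.2.1)]
  have hfe : others.filter (pvPredD node d.1)
      = others.filter (fun y => ((fun r => decide (node.1 < r) && decide (r < d.1)) ∘ Prod.fst) y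
          && decide (y.2 = node.2)) := by
    apply List.filter_congr
    intro y _
    simp only [pvPredD, pvQD, Function.comp]
    refine Bool.eq_iff_iff.mpr ?_
    simp only [Bool.and_eq_true, decide_eq_true_eq]
    constructor
    · rintro ⟨⟨hy1, hy2, hy3⟩, hy4⟩; exact ⟨⟨hy3, hy4⟩, hy2⟩
    · rintro ⟨⟨hy3, hy4⟩, hy2⟩
      refine ⟨⟨?_, hy2, hy3⟩, hy4⟩
      intro he; rw [he] at hy3; exact lt_irrefl _ hy3
  rw [hfe, ← List.filter_filter, ← List.filter_map]

theorem pv_mainU (node : Int × Int) (others : List (Int × Int)) (u : Int × Int)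
    (hu : u.2 = node.2) :
    others.foldl (pvStepU node) u
      = ((((others.filter (fun nd => nd.2 = node.2)).map Prod.fst).filter
            (fun r => decide (u.1 < r) && decide (r < node.1))).foldl
          (fun m r => if r > m then r else m) u.1, node.2) := by
  rw [pv_mainU_pair node others u hu]
  rw [pvMaxFrom_snd_const (others.filter (pvPredU node u.1)) node.2 u hu
        (by
          intro p hp
          have := List.of_mem_filter hp
          simp only [pvPredU, pvQU, Bool.and_eq_true, decide_eq_true_eq] at this
          exact this.1.2.1)]
  have hfe : others.filter (pvPredU node u.1)
      = others.filter (fun y => ((fun r => decide (u.1 < r) && decide (r < node.1)) ∘ Prod.fst) y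
          && decide (y.2 = node.2)) := by
    apply List.filter_congr
    intro y _
    simp only [pvPredU, pvQU, Function.comp]
    refine Bool.eq_iff_iff.mpr ?_
    simp only [Bool.and_eq_true, decide_eq_true_eq]
    constructor
    · rintro ⟨⟨hy1, hy2, hy3⟩, hy4⟩; exact ⟨⟨hy4, hy3⟩, hy2⟩
    · rintro ⟨⟨hy4, hy3⟩, hy2⟩
      refine ⟨⟨?_, hy2, hy3⟩, hy4⟩
      intro he; rw [he] at hy3; exact lt_irrefl _ hy3
  rw [hfe, ← List.filter_filter, ← List.filter_map]

-- binary-search correctness for B's helpers (on a monotone list)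
theorem pvBisectGt_spec (rows : List Int) (x : Int)
    (mono : ∀ j k : Nat, j ≤ k → k < rows.length → rows.getD j 0 ≤ rows.getD k 0) :
    ∀ d lo hi, hi - lo = d → hi ≤ rows.length → lo ≤ hi →
      (∀ j : Nat, j < lo → rows.getD j 0 ≤ x) →
      (∀ j : Nat, hi ≤ j → j < rows.length → x < rows.getD j 0) →
      lo ≤ pvBisectGt rows x lo hi ∧ pvBisectGt rows x lo hi ≤ hi ∧
      (∀ j : Nat, j < pvBisectGt rows x lo hi → rows.getD j 0 ≤ x) ∧
      (∀ j : Nat, pvBisectGt rows x lo hi ≤ j → j < rows.length → x < rows.getD j 0) := by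
  intro d
  induction d using Nat.strong_induction_on with
  | _ d ih =>
      intro lo hi hd hhi hlohi pre1 pre2
      rw [pvBisectGt]
      by_cases hlh : lo ≥ hi
      · rw [if_pos hlh]
        have : lo = hi := by omega
        exact ⟨le_rfl, hlohi, pre1, fun j hj hjl => pre2 j (by omega) hjl⟩
      · rw [if_neg hlh]
        have hlo : lo < hi := by omega
        have hmlo : lo ≤ (lo + hi) / 2 := by omega
        have hmhi : (lo + hi) / 2 < hi := by omega
        by_cases hx : rows.getD ((lo + hi) / 2) 0 ≤ x
        · simp only [if_pos hx]
          have := ih (hi - ((lo + hi) / 2 + 1)) (by omega) ((lo + hi) / 2 + 1) hi rfl hhi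
              (by omega)
              (fun j hj => le_trans (mono j ((lo + hi) / 2) (by omega) (by omega)) hx)
              pre2
          exact ⟨by omega, this.2.1, this.2.2.1, this.2.2.2⟩
        · simp only [if_neg hx]
          have := ih ((lo + hi) / 2 - lo) (by omega) lo ((lo + hi) / 2) rfl (by omega)
              (by omega) pre1
              (fun j hj hjl => lt_of_lt_of_le (lt_of_not_ge fun hc => hx (hc)) (mono ((lo + hi) / 2) j hj hjl))
          exact ⟨this.1, by omega, this.2.2.1, this.2.2.2⟩

theorem pvBisectGe_spec (rows : List Int) (x : Int)
    (mono : ∀ j k : Nat, j ≤ k → k < rows.length → rows.getD j 0 ≤ rows.getD k 0) :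
    ∀ d lo hi, hi - lo = d → hi ≤ rows.length → lo ≤ hi →
      (∀ j : Nat, j < lo → rows.getD j 0 < x) →
      (∀ j : Nat, hi ≤ j → j < rows.length → x ≤ rows.getD j 0) →
      lo ≤ pvBisectGe rows x lo hi ∧ pvBisectGe rows x lo hi ≤ hi ∧
      (∀ j : Nat, j < pvBisectGe rows x lo hi → rows.getD j 0 < x) ∧
      (∀ j : Nat, pvBisectGe rows x lo hi ≤ j → j < rows.length → x ≤ rows.getD j 0) := by
  intro d
  induction d using Nat.strong_induction_on with
  | _ d ih =>
      intro lo hi hd hhi hlohi pre1 pre2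
      rw [pvBisectGe]
      by_cases hlh : lo ≥ hi
      · rw [if_pos hlh]
        have : lo = hi := by omega
        exact ⟨le_rfl, hlohi, pre1, fun j hj hjl => pre2 j (by omega) hjl⟩
      · rw [if_neg hlh]
        have hlo : lo < hi := by omega
        have hmlo : lo ≤ (lo + hi) / 2 := by omega
        have hmhi : (lo + hi) / 2 < hi := by omega
        by_cases hx : rows.getD ((lo + hi) / 2) 0 < x
        · simp only [if_pos hx]
          have := ih (hi - ((lo + hi) / 2 + 1)) (by omega) ((lo + hi) / 2 + 1) hi rfl hhi
              (by omega)
              (fun j hj => lt_of_le_of_lt (mono j ((lo + hi) / 2) (by omega) (by omega)) hx)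
              pre2
          exact ⟨by omega, this.2.1, this.2.2.1, this.2.2.2⟩
        · simp only [if_neg hx]
          have := ih ((lo + hi) / 2 - lo) (by omega) lo ((lo + hi) / 2) rfl (by omega)
              (by omega) pre1
              (fun j hj hjl => le_trans (le_of_not_gt hx) (mono ((lo + hi) / 2) j hj hjl))
          exact ⟨this.1, by omega, this.2.2.1, this.2.2.2⟩

theorem pv_foldl_min_self (t : List Int) : ∀ m : Int, (∀ r ∈ t, m ≤ r) →
    t.foldl (fun a r => if r < a then r else a) m = m := by
  induction t with
  | nil => intro m _; rfl
  | cons r t ih =>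
      intro m h
      show t.foldl _ (if r < m then r else m) = m
      rw [if_neg (not_lt.mpr (h r (by simp)))]
      exact ih m (fun q hq => h q (by simp [hq]))

theorem pv_foldl_min_eq (F : List Int) : ∀ b m : Int, m ∈ F →
    (∀ r ∈ F, m ≤ r) → m ≤ b →
    F.foldl (fun a r => if r < a then r else a) b = m := by
  induction F with
  | nil => intro b m hm; exact absurd hm (List.not_mem_nil)
  | cons r t ih =>
      intro b m hm hall hb
      show t.foldl _ (if r < b then r else b) = m
      by_cases hmt : m ∈ t
      · exact ih _ m hmt (fun q hq => hall q (by simp [hq]))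
          (by split_ifs with h; exact hall r (by simp); exact hb)
      · have hmr : m = r := by
          rcases List.mem_cons.mp hm with h | h
          · exact h
          · exact absurd h hmt
        have hacc : (if r < b then r else b) = m := by
          have := hall r (by simp)
          split_ifs with h <;> omega
        rw [hacc]
        exact pv_foldl_min_self t m (fun q hq => hall q (by simp [hq]))

theorem pv_foldl_max_self (t : List Int) : ∀ m : Int, (∀ r ∈ t, r ≤ m) →
    t.foldl (fun a r => if r > a then r else a) m = m := by
  induction t with
  | nil => intro m _; rfl
  | cons r t ih =>
      intro m h
      show t.foldl _ (if r > m then r else m) = m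
      rw [if_neg (not_lt.mpr (h r (by simp)))]
      exact ih m (fun q hq => h q (by simp [hq]))

theorem pv_foldl_max_eq (F : List Int) : ∀ b m : Int, m ∈ F →
    (∀ r ∈ F, r ≤ m) → b ≤ m →
    F.foldl (fun a r => if r > a then r else a) b = m := by
  induction F with
  | nil => intro b m hm; exact absurd hm (List.not_mem_nil)
  | cons r t ih =>
      intro b m hm hall hb
      show t.foldl _ (if r > b then r else b) = m
      by_cases hmt : m ∈ t
      · exact ih _ m hmt (fun q hq => hall q (by simp [hq]))
          (by split_ifs with h; exact hall r (by simp); exact hb)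
      · have hmr : m = r := by
          rcases List.mem_cons.mp hm with h | h
          · exact h
          · exact absurd h hmt
        have hacc : (if r > b then r else b) = m := by
          have := hall r (by simp)
          split_ifs with h <;> omega
        rw [hacc]
        exact pv_foldl_max_self t m (fun q hq => hall q (by simp [hq]))

-- monotonicity of the sorted row list, in getD form
theorem pv_sorted_mono (L : List Int) :
    ∀ j k : Nat, j ≤ k → k < (PySem.List.sorted L (fun r => r) false).length →
      (PySem.List.sorted L (fun r => r) false).getD j 0
        ≤ (PySem.List.sorted L (fun r => r) false).getD k 0 := by
  intro j k hjk hk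
  have hpw : (PySem.List.sorted L (fun r => r) false).Pairwise (fun a b => a ≤ b) :=
    PySem.List.sorted_pairwise L (fun r => r)
  have hj : j < (PySem.List.sorted L (fun r => r) false).length := lt_of_le_of_lt hjk hk
  rw [List.getD_eq_getElem _ _ hj, List.getD_eq_getElem _ _ hk]
  rcases lt_or_eq_of_le hjk with h | h
  · exact List.pairwise_iff_getElem.mp hpw j k hj hk h
  · subst h; exact le_rfl

-- the core: binary search on the sorted rows computes the bounded window min / max
theorem pv_down_core (L : List Int) (x b : Int) (rows : List Int)
    (hrows : rows = PySem.List.sorted L (fun r => r) false) :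
    (if pvBisectGt rows x 0 rows.length < rows.length ∧
        rows.getD (pvBisectGt rows x 0 rows.length) 0 < b then
      rows.getD (pvBisectGt rows x 0 rows.length) 0
    else b)
    = (L.filter (fun r => decide (x < r) && decide (r < b))).foldl
        (fun m r => if r < m then r else m) b := by
  have hperm : rows.Perm L := hrows ▸ PySem.List.sorted_perm L (fun r => r) false
  have mono := hrows ▸ pv_sorted_mono L
  obtain ⟨-, hle, hlow, hhigh⟩ := pvBisectGt_spec rows x mono rows.length 0 rows.length rfl
    le_rfl (Nat.zero_le _) (by omega) (by omega)
  set i := pvBisectGt rows x 0 rows.length with hi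
  by_cases h : i < rows.length ∧ rows.getD i 0 < b
  · rw [if_pos h]
    refine (pv_foldl_min_eq _ b _ ?_ ?_ (le_of_lt h.2)).symm
    · refine List.mem_filter.mpr ⟨?_, ?_⟩
      · exact hperm.mem_iff.mp (by rw [List.getD_eq_getElem _ _ h.1]; exact List.getElem_mem h.1)
      · simp only [Bool.and_eq_true, decide_eq_true_eq]
        exact ⟨hhigh i le_rfl h.1, h.2⟩
    · intro r hr
      obtain ⟨hrL, hrp⟩ := List.mem_filter.mp hr
      simp only [Bool.and_eq_true, decide_eq_true_eq] at hrp
      obtain ⟨j, hj, hje⟩ := List.mem_iff_getElem.mp (hperm.mem_iff.mpr hrL)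
      have hji : i ≤ j := by
        by_contra hc
        have := hlow j (by omega)
        rw [List.getD_eq_getElem _ _ hj, hje] at this
        omega
      have := mono i j hji hj
      rw [List.getD_eq_getElem _ _ hj, hje] at this
      exact this
  · rw [if_neg h]
    have hF : L.filter (fun r => decide (x < r) && decide (r < b)) = [] := by
      refine List.filter_eq_nil_iff.mpr ?_
      intro r hrL hrp
      simp only [Bool.and_eq_true, decide_eq_true_eq] at hrp
      obtain ⟨j, hj, hje⟩ := List.mem_iff_getElem.mp (hperm.mem_iff.mpr hrL)
      have hji : i ≤ j := by
        by_contra hc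
        have := hlow j (by omega)
        rw [List.getD_eq_getElem _ _ hj, hje] at this
        omega
      have hmono := mono i j hji hj
      rw [List.getD_eq_getElem _ _ hj, hje] at hmono
      exact h ⟨by omega, by omega⟩
    rw [hF]
    rfl

theorem pv_up_core (L : List Int) (x b : Int) (rows : List Int)
    (hrows : rows = PySem.List.sorted L (fun r => r) false) :
    (if 0 < pvBisectGe rows x 0 rows.length ∧
        rows.getD (pvBisectGe rows x 0 rows.length - 1) 0 > b then
      rows.getD (pvBisectGe rows x 0 rows.length - 1) 0
    else b)
    = (L.filter (fun r => decide (b < r) && decide (r < x))).foldl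
        (fun m r => if r > m then r else m) b := by
  have hperm : rows.Perm L := hrows ▸ PySem.List.sorted_perm L (fun r => r) false
  have mono := hrows ▸ pv_sorted_mono L
  obtain ⟨-, hle, hlow, hhigh⟩ := pvBisectGe_spec rows x mono rows.length 0 rows.length rfl
    le_rfl (Nat.zero_le _) (by omega) (by omega)
  set j := pvBisectGe rows x 0 rows.length with hj
  by_cases h : 0 < j ∧ rows.getD (j - 1) 0 > b
  · rw [if_pos h]
    have hj1 : j - 1 < rows.length := by omega
    refine (pv_foldl_max_eq _ b _ ?_ ?_ (le_of_lt h.2)).symm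
    · refine List.mem_filter.mpr ⟨?_, ?_⟩
      · exact hperm.mem_iff.mp (by rw [List.getD_eq_getElem _ _ hj1]; exact List.getElem_mem hj1)
      · simp only [Bool.and_eq_true, decide_eq_true_eq]
        exact ⟨h.2, hlow (j - 1) (by omega)⟩
    · intro r hr
      obtain ⟨hrL, hrp⟩ := List.mem_filter.mp hr
      simp only [Bool.and_eq_true, decide_eq_true_eq] at hrp
      obtain ⟨k, hk, hke⟩ := List.mem_iff_getElem.mp (hperm.mem_iff.mpr hrL)
      have hkj : k < j := by
        by_contra hc
        have := hhigh k (by omega) hk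
        rw [List.getD_eq_getElem _ _ hk, hke] at this
        omega
      have := mono k (j - 1) (by omega) hj1
      rw [List.getD_eq_getElem _ _ hk, hke] at this
      exact this
  · rw [if_neg h]
    have hF : L.filter (fun r => decide (b < r) && decide (r < x)) = [] := by
      refine List.filter_eq_nil_iff.mpr ?_
      intro r hrL hrp
      simp only [Bool.and_eq_true, decide_eq_true_eq] at hrp
      obtain ⟨k, hk, hke⟩ := List.mem_iff_getElem.mp (hperm.mem_iff.mpr hrL)
      have hkj : k < j := by
        by_contra hc
        have := hhigh k (by omega) hk
        rw [List.getD_eq_getElem _ _ hk, hke] at this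
        omega
      have hj1 : j - 1 < rows.length := by omega
      have hmono := mono k (j - 1) (by omega) hj1
      rw [List.getD_eq_getElem _ _ hk, hke] at hmono
      exact h ⟨by omega, by omega⟩
    rw [hF]
    rfl

-- ===== VERDICT (by name: the statement is the Claim_ definition above) =====
theorem get_down_and_up_nodes_spec : Claim_equal_get_down_and_up_nodes := by
  intro node others dj uj _
  unfold Spec_get_down_and_up_nodes get_down_and_up_nodes get_down_and_up_nodes_alt
  rw [pv_split]
  dsimp only
  refine Prod.ext ?_ ?_ <;> dsimp only
  · by_cases hd : dj.2 = node.2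
    · rw [if_pos hd, pv_mainD node others dj hd,
        ← pv_down_core ((others.filter (fun nd => nd.2 = node.2)).map Prod.fst) node.1 dj.1 _ rfl]
      split_ifs with h
      · rfl
      · exact Prod.ext rfl hd.symm
    · rw [if_neg hd, pv_nocolD node others dj hd]
  · by_cases hu : uj.2 = node.2
    · rw [if_pos hu, pv_mainU node others uj hu,
        ← pv_up_core ((others.filter (fun nd => nd.2 = node.2)).map Prod.fst) node.1 uj.1 _ rfl]
      split_ifs with h
      · rfl
      · exact Prod.ext rfl hu.symm
    · rw [if_neg hu, pv_nocolU node others uj hu]
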